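-- pv_equiv track=rewrite | github.com/kaushiknimalan/Python-Practice-Programs | Strings/Word searcher/main.py | check
-- ===== SOURCE A (Python) =====
-- def check(list_, word):
--     index = 0
--     check_ = True
--     index_pos = 0
--     spaces = len(list_) - 1
--     crossed_spaces = 0
--     the_no_of_wrds = len(list_)
--     while index <= len(list_):
--         try:
--             if list_[index] == word:
--                 check_ = True
--                 the_no_of_wrds -= len(list_[index])
--                 break
--             if not crossed_spaces == spaces:
--                 crossed_spaces += 1
--             index_pos += len(list_[index])
--             index += 1
--         except IndexError:
--             check_ = False
--             break
--     return check_, index_pos + the_no_of_wrds + crossed_spaces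
-- ===== SOURCE B (Python) =====
-- def check(list_, word):
--     if word in list_:
--         i = list_.index(word)
--         return True, sum(len(w) for w in list_[:i]) + len(list_) - len(word) + i
--     return False, sum(len(w) for w in list_) + max(2 * len(list_) - 1, 0)
-- ===== Notes on version B (the rewrite author's own statement) =====
-- stated objective: simpler
-- what changed: Replaces A's stateful while-loop with try/except (tracking index_pos, crossed_spaces with its cap, and the_no_of_wrds) by a direct membership/index lookup plus closed-form sums: sum of lengths before the hit + len(list_) - len(word) + index on a hit, and total length + max(2*len-1, 0) otherwise.
import Mathlib
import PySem

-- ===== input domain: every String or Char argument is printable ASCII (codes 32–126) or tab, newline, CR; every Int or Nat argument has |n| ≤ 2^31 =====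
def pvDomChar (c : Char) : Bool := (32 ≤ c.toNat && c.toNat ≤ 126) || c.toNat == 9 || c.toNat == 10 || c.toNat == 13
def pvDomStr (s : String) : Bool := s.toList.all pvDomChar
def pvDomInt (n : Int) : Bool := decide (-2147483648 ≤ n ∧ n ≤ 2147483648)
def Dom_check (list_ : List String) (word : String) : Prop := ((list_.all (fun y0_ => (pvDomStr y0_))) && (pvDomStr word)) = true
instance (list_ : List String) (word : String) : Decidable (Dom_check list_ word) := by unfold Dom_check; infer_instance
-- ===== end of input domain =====

-- B replaces A's stateful scanning loop by a single index lookup plus closed-form sums (simpler; same O(total length) cost).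

-- ===== PORT A =====
-- the while loop of A: state (index, check_, index_pos, spaces, crossed_spaces, the_no_of_wrds);
-- the IndexError of list_[index] becomes pyGet? returning none
def checkLoop (list_ : List String) (word : String) (index : Nat) (check_ : Bool)
    (index_pos spaces crossed_spaces the_no_of_wrds : Int) : Bool × Int :=
  if h : index ≤ list_.length then
    match PySem.List.pyGet? list_ (index : Int) with
    | none => (false, index_pos + the_no_of_wrds + crossed_spaces)
    | some w =>
      if w = word then
        (true, index_pos + (the_no_of_wrds - PySem.Str.len w) + crossed_spaces)
      else
        let crossed_spaces' := if ¬ crossed_spaces = spaces then crossed_spaces + 1 else crossed_spaces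
        checkLoop list_ word (index + 1) check_ (index_pos + PySem.Str.len w) spaces crossed_spaces' the_no_of_wrds
  else (check_, index_pos + the_no_of_wrds + crossed_spaces)
termination_by list_.length + 1 - index
decreasing_by omega

def check (list_ : List String) (word : String) : Bool × Int :=
  checkLoop list_ word 0 true 0 ((list_.length : Int) - 1) 0 (list_.length : Int)

-- ===== PORT B =====
def check_alt (list_ : List String) (word : String) : Bool × Int :=
  match PySem.List.index? list_ word with
  | some i =>
      (true, ((list_.take i).map PySem.Str.len).sum + (list_.length : Int) - PySem.Str.len word + (i : Int))
  | none =>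
      (false, (list_.map PySem.Str.len).sum + max (2 * (list_.length : Int) - 1) 0)

-- ===== PRECONDITION & SPEC =====
def Spec_check (list_ : List String) (word : String) (out : Bool × Int) : Prop := out = check_alt list_ word
instance (list_ : List String) (word : String) (out : Bool × Int) : Decidable (Spec_check list_ word out) := by unfold Spec_check; infer_instance

-- ===== CLAIM (what is proved, stated in full; the proofs are below) =====
def Claim_equal_check : Prop := ∀ (list_ : List String) (word : String), Dom_check list_ word → Spec_check list_ word (check list_ word)

-- ===== LEMMAS AND PROOFS =====

theorem checkLoop_eq (list_ : List String) (word : String) (i : Nat)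
    (hle : i ≤ list_.length)
    (hnot : ∀ j (hj : j < i), list_[j]'(by omega) ≠ word) :
    checkLoop list_ word i true (((list_.take i).map PySem.Str.len).sum)
      ((list_.length : Int) - 1)
      (if list_.length = 0 then 0 else min (i : Int) ((list_.length : Int) - 1))
      (list_.length : Int) = check_alt list_ word := by
  generalize hn : list_.length - i = n
  induction n generalizing i with
  | zero =>
    have hi : i = list_.length := by omega
    rw [checkLoop, dif_pos hle]
    have hg : PySem.List.pyGet? list_ (i : Int) = none := by
      rw [PySem.List.pyGet?_natCast]
      simp [hi]
    rw [hg]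
    dsimp only
    have hw : word ∉ list_ := by
      intro hmem
      obtain ⟨j, hj, hje⟩ := List.getElem_of_mem hmem
      exact hnot j (by omega) hje
    unfold check_alt
    rw [(PySem.List.index?_eq_none_iff list_ word).mpr hw]
    have ht : list_.take i = list_ := by rw [hi, List.take_length]
    rw [ht]
    rcases Nat.eq_zero_or_pos list_.length with h0 | h0
    · simp [h0]
    · have : list_.length ≠ 0 := by omega
      simp only [this, if_false]
      have h1 : (1 : Int) ≤ (list_.length : Int) := by exact_mod_cast h0
      refine Prod.ext rfl ?_
      simp only []
      omega
  | succ n ih =>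
    have hi : i < list_.length := by omega
    rw [checkLoop, dif_pos hle]
    have hg : PySem.List.pyGet? list_ (i : Int) = some (list_[i]'hi) := by
      rw [PySem.List.pyGet?_natCast]
      simp [List.getElem?_eq_getElem hi]
    rw [hg]
    dsimp only
    have hlen0 : list_.length ≠ 0 := by omega
    by_cases heq : list_[i]'hi = word
    · rw [if_pos heq]
      have hidx : PySem.List.index? list_ word = some i := by
        rw [PySem.List.index?_eq_some_iff list_ word i]
        refine ⟨list_.take i, list_.drop (i + 1), ?_, ?_, ?_⟩
        · conv_lhs => rw [← List.take_append_drop i list_]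
          rw [List.drop_eq_getElem_cons hi, heq]
        · simp [Nat.min_eq_left hle]
        · intro hmem
          obtain ⟨j, hj, hje⟩ := List.getElem_of_mem hmem
          have hjlt : j < i := by simp at hj; omega
          rw [List.getElem_take] at hje
          exact hnot j hjlt hje
      unfold check_alt
      rw [hidx]
      refine Prod.ext rfl ?_
      simp only [heq, hlen0, if_false]
      have h1 : (i : Int) ≤ (list_.length : Int) - 1 := by
        have : (i : Int) < (list_.length : Int) := by exact_mod_cast hi
        omega
      rw [min_eq_left h1]
      ring
    · rw [if_neg heq]
      have hnot' : ∀ j (hj : j < i + 1), list_[j]'(by omega) ≠ word := by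
        intro j hj
        rcases Nat.lt_or_ge j i with hlt | hge
        · exact hnot j hlt
        · have : j = i := by omega
          subst this
          exact heq
      have hsum : (((list_.take i).map PySem.Str.len).sum) + PySem.Str.len (list_[i]'hi)
          = ((list_.take (i + 1)).map PySem.Str.len).sum := by
        rw [List.map_take, List.map_take, List.sum_take_succ _ i (by simpa using hi),
          List.getElem_map]
      have hcross : (if ¬ (if list_.length = 0 then (0:Int) else min (i : Int) ((list_.length : Int) - 1)) = (list_.length : Int) - 1
            then (if list_.length = 0 then (0:Int) else min (i : Int) ((list_.length : Int) - 1)) + 1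
            else (if list_.length = 0 then (0:Int) else min (i : Int) ((list_.length : Int) - 1)))
          = (if list_.length = 0 then (0:Int) else min ((i : Int) + 1) ((list_.length : Int) - 1)) := by
        simp only [hlen0, if_false]
        have h1 : (1 : Int) ≤ (list_.length : Int) := by
          have : 0 < list_.length := by omega
          exact_mod_cast this
        split_ifs with hc
        · omega
        · omega
      have h2 := ih (i + 1) (by omega) hnot' (by omega)
      rw [hsum, hcross]
      push_cast at h2 ⊢
      exact h2

-- ===== VERDICT (by name: the statement is the Claim_ definition above) =====
theorem check_spec : Claim_equal_check := by
  intro list_ word _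
  unfold Spec_check check
  have h := checkLoop_eq list_ word 0 (Nat.zero_le _) (fun j hj => absurd hj (Nat.not_lt_zero j))
  have hc : (if list_.length = 0 then (0:Int) else min ((0:Nat) : Int) ((list_.length : Int) - 1)) = 0 := by
    split
    · rfl
    · rename_i hne
      have : (1 : Int) ≤ (list_.length : Int) := by
        have : 0 < list_.length := Nat.pos_of_ne_zero hne
        exact_mod_cast this
      simp
      omega
  rw [hc] at h
  simpa using h
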